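-- pv_equiv track=rewrite | github.com/giacomobais/AoC | 2024/9/day9.py | get_good_position
-- ===== SOURCE A (Python) =====
-- def get_good_position(file_blocks, memory_needed, j):
--     """Calculates the index that corresponds to the first availaspace of memory_needed, looking from l2r"""
--     space = 0
--     good_i = -1
--     for i, block in enumerate(file_blocks):
--         # limit for the search is the position of the block we are trying to move
--         if i >= j:
--             break
--         # found candidate position
--         if block == '.' and space == 0:
--             good_i = i
--         # count dots == space
--         if block == '.':
--             space += 1
--         # if we find a non-dot block, we check if we have enough space
--         if block != '.' and space > 0:
--             if space >= memory_needed: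
--                 # found a match!
--                 return good_i
--             # if the space was too small, we reset the counter for space
--             space = 0
--     # corner case, if the last block is a dot we still check, should not be necessary because of the i>=j condition
--     if space >= memory_needed:
--         return good_i
--     # we return -1 if there is no good position
--     else:
--         return -1
-- ===== SOURCE B (Python) =====
-- def get_good_position(file_blocks, memory_needed, j):
--     """Run-length two-pointer scan: first maximal dot-run of length >= memory_needed in file_blocks[:max(j,0)]."""
--     prefix = file_blocks[:max(j, 0)]
--     n = len(prefix)
--     pos = 0
--     while pos < n:
--         end = pos
--         while end < n and prefix[end] == prefix[pos]:
--             end += 1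
--         if prefix[pos] == '.' and end - pos >= memory_needed:
--             return pos
--         pos = end
--     return -1
-- ===== Notes on version B (the rewrite author's own statement) =====
-- stated objective: alternative
-- what changed: Replaces A's single stateful pass that counts consecutive dots in an accumulator (with candidate index and reset logic) by an explicit two-pointer run-length scan over the materialized prefix file_blocks[:max(j,0)], returning the start of the first maximal dot-run of length >= memory_needed.
import Mathlib
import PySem

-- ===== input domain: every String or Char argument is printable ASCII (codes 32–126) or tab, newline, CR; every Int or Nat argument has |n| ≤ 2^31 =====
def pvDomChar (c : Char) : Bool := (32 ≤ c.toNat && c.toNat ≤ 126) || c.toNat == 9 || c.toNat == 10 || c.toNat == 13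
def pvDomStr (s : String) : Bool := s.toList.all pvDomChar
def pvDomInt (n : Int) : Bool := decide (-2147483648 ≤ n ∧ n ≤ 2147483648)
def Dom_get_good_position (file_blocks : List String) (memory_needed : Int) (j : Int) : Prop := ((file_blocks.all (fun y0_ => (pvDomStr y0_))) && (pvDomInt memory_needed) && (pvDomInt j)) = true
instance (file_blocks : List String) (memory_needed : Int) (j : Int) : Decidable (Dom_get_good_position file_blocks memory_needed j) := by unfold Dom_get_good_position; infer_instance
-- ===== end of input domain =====

-- B replaces A's stateful dot-counting accumulator with a run-length two-pointer scan over
-- the explicit prefix file_blocks[:max(j,0)] (objective: alternative decomposition, same cost).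


-- ===== PORT A =====
-- A's for-loop over enumerate(file_blocks) with break at i ≥ j, carrying (space, good_i);
-- the early 'return good_i' is the then-branch, the post-loop check is the []/break case.
def ggpA_loop (memory_needed j : Int) : List String → Int → Int → Int → Int
  | [], _, space, good_i => if space ≥ memory_needed then good_i else -1
  | block :: rest, i, space, good_i =>
    if i ≥ j then (if space ≥ memory_needed then good_i else -1)
    else
      let good_i' := if block = "." ∧ space = 0 then i else good_i
      let space' := if block = "." then space + 1 else space
      if block ≠ "." ∧ space' > 0 then
        (if space' ≥ memory_needed then good_i'
         else ggpA_loop memory_needed j rest (i + 1) 0 good_i')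
      else ggpA_loop memory_needed j rest (i + 1) space' good_i'

def get_good_position (file_blocks : List String) (memory_needed : Int) (j : Int) : Int :=
  ggpA_loop memory_needed j file_blocks 0 0 (-1)

-- ===== PORT B =====
-- Source B's outer while over pos; the inner while that extends `end` over the run of elements
-- equal to prefix[pos] is the takeWhile/dropWhile split of the remaining list.
def ggpB_loop (memory_needed : Int) : List String → Int → Int
  | [], _ => -1
  | x :: xs, pos =>
    let run := xs.takeWhile (fun y => y == x)
    let n : Int := 1 + run.length
    if x = "." ∧ n ≥ memory_needed then pos
    else ggpB_loop memory_needed (xs.dropWhile (fun y => y == x)) (pos + n)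
  termination_by l _ => l.length
  decreasing_by
    simp only [List.length_cons]
    exact Nat.lt_succ_of_le (List.length_dropWhile_le _ _)

def get_good_position_alt (file_blocks : List String) (memory_needed : Int) (j : Int) : Int :=
  ggpB_loop memory_needed (PySem.List.slice file_blocks none (some (max j 0))) 0

-- ===== PRECONDITION & SPEC =====
def Spec_get_good_position (file_blocks : List String) (memory_needed : Int) (j : Int) (out : Int) : Prop := out = get_good_position_alt file_blocks memory_needed j
instance (file_blocks : List String) (memory_needed : Int) (j : Int) (out : Int) : Decidable (Spec_get_good_position file_blocks memory_needed j out) := by unfold Spec_get_good_position; infer_instance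

-- ===== CLAIM (what is proved, stated in full; the proofs are below) =====
def Claim_equal_get_good_position : Prop := ∀ (file_blocks : List String) (memory_needed : Int) (j : Int), Dom_get_good_position file_blocks memory_needed j → Spec_get_good_position file_blocks memory_needed j (get_good_position file_blocks memory_needed j)

-- ===== LEMMAS AND PROOFS =====

-- A's loop with the index bound stripped: it only ever sees the first (j - i) elements.
def ggpA2 (memory_needed : Int) : List String → Int → Int → Int → Int
  | [], _, space, good_i => if space ≥ memory_needed then good_i else -1
  | block :: rest, i, space, good_i =>
    let good_i' := if block = "." ∧ space = 0 then i else good_i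
    let space' := if block = "." then space + 1 else space
    if block ≠ "." ∧ space' > 0 then
      (if space' ≥ memory_needed then good_i'
       else ggpA2 memory_needed rest (i + 1) 0 good_i')
    else ggpA2 memory_needed rest (i + 1) space' good_i'

theorem ggpA_loop_eq_ggpA2 (m j : Int) :
    ∀ (l : List String) (i space good : Int),
      ggpA_loop m j l i space good = ggpA2 m (l.take (j - i).toNat) i space good := by
  intro l
  induction l with
  | nil => intro i space good; simp [ggpA_loop, ggpA2]
  | cons b rest ih =>
    intro i space good
    by_cases hij : i ≥ j
    · have h0 : (j - i).toNat = 0 := by omega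
      simp [ggpA_loop, ggpA2, hij, h0]
    · have h1 : (j - i).toNat = (j - (i + 1)).toNat + 1 := by omega
      rw [h1]
      simp only [ggpA_loop, ggpA2, List.take_succ_cons, if_neg hij]
      simp only [ih]

-- Source B's scan absorbs a leading non-dot block one position at a time.
theorem ggpB_loop_cons_nondot (m : Int) (x : String) (xs : List String) (pos : Int)
    (hx : x ≠ ".") : ggpB_loop m (x :: xs) pos = ggpB_loop m xs (pos + 1) := by
  cases xs with
  | nil => simp [ggpB_loop, hx]
  | cons y ys =>
    by_cases hyx : y = x
    · subst hyx
      rw [ggpB_loop, ggpB_loop]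
      simp only [List.takeWhile_cons, List.dropWhile_cons, beq_self_eq_true, hx,
        false_and, if_false]
      congr 1
      push_cast [List.length_cons]
      ring
    · have hbeq : (y == x) = false := beq_false_of_ne hyx
      rw [ggpB_loop]
      simp only [List.takeWhile_cons, List.dropWhile_cons, hbeq, hx, false_and, if_false]
      norm_num

-- A's loop inside a dot run already s long: it returns good_i as soon as the whole run
-- reaches memory_needed, otherwise consumes the run plus the non-dot after it and resets.
theorem ggpA2_dotrun (m : Int) :
    ∀ (xs : List String) (pos s good : Int), 1 ≤ s →
      ggpA2 m xs pos s good =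
        (if s + ((xs.takeWhile (fun y => y == ".")).length : Int) ≥ m then good
         else
           match xs.dropWhile (fun y => y == ".") with
           | [] => -1
           | _ :: ys =>
             ggpA2 m ys (pos + ((xs.takeWhile (fun y => y == ".")).length : Int) + 1) 0 good) := by
  intro xs
  induction xs with
  | nil => intro pos s good hs; simp [ggpA2]
  | cons x xs' ih =>
    intro pos s good hs
    by_cases hx : x = "."
    · subst hx
      have hsne : s ≠ 0 := by omega
      rw [ggpA2]
      simp only [List.takeWhile_cons, List.dropWhile_cons, beq_self_eq_true, if_true,
        List.length_cons, ne_eq, not_true_eq_false, false_and, if_false, hsne, and_false]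
      rw [ih (pos + 1) (s + 1) good (by omega)]
      have harith : ∀ t : Int, s + 1 + t = s + (t + 1) := by intro t; ring
      cases hdrop : xs'.dropWhile (fun y => y == ".") with
      | nil =>
        rw [harith]
        push_cast
        ring_nf
      | cons z zs =>
        rw [harith]
        push_cast
        split
        · rfl
        · congr 1; ring
    · rw [ggpA2]
      have hbeq : (x == ".") = false := beq_false_of_ne hx
      simp only [List.takeWhile_cons, List.dropWhile_cons, hbeq, if_false,
        Bool.false_eq_true]
      have h1 : ¬ (x = "." ∧ s = 0) := by rintro ⟨h, _⟩; exact hx h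
      rw [if_neg h1, if_neg hx]
      have h3 : (x ≠ "." ∧ s > 0) := ⟨hx, by omega⟩
      rw [if_pos h3]
      norm_num

-- Main correspondence: A's unbounded loop in the reset state equals B's run loop,
-- provided the carried good_i is -1 whenever memory_needed ≤ 0 (true initially; a reset implies m > 0).
theorem ggpA2_eq_ggpB (m : Int) :
    ∀ (n : Nat) (l : List String), l.length ≤ n → ∀ (pos good : Int), (m ≤ 0 → good = -1) →
      ggpA2 m l pos 0 good = ggpB_loop m l pos := by
  intro n
  induction n with
  | zero =>
    intro l hl pos good hg
    have : l = [] := List.eq_nil_of_length_eq_zero (Nat.le_zero.mp hl)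
    subst this
    rw [ggpA2, ggpB_loop]
    split
    · next h => exact hg (by omega)
    · rfl
  | succ n ih =>
    intro l hl pos good hg
    cases l with
    | nil =>
      rw [ggpA2, ggpB_loop]
      split
      · next h => exact hg (by omega)
      · rfl
    | cons x xs =>
      simp only [List.length_cons, Nat.succ_le_succ_iff] at hl
      by_cases hx : x = "."
      · subst hx
        rw [ggpA2]
        rw [if_pos (⟨rfl, rfl⟩ : (".":String) = "." ∧ (0:Int) = 0)]
        rw [if_pos rfl]
        have hne : ¬ ((".":String) ≠ "." ∧ (0:Int) + 1 > 0) := by rintro ⟨h, _⟩; exact h rfl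
        rw [if_neg hne]
        rw [ggpA2_dotrun m xs (pos + 1) (0 + 1) pos (by omega)]
        rw [ggpB_loop]
        simp only [true_and]
        set k : Int := ((xs.takeWhile (fun y => y == ".")).length : Int) with hk
        by_cases hbig : 0 + 1 + k ≥ m
        · rw [if_pos hbig, if_pos (by omega : 1 + k ≥ m)]
        · rw [if_neg hbig, if_neg (by omega : ¬ 1 + k ≥ m)]
          have hm : 0 < m := by
            have hk0 : 0 ≤ k := by positivity
            omega
          cases hdrop : xs.dropWhile (fun y => y == ".") with
          | nil =>
            rw [ggpB_loop]
          | cons z zs =>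
            show ggpA2 m zs (pos + 1 + k + 1) 0 pos = ggpB_loop m (z :: zs) (pos + (1 + k))
            have hz : z ≠ "." := by
              have h := List.head?_dropWhile_not (fun y => y == ".") xs
              rw [hdrop] at h
              simpa using h
            rw [ggpB_loop_cons_nondot m z zs _ hz]
            have hlen : zs.length ≤ n := by
              have h1 : (z :: zs).length ≤ xs.length := by
                rw [← hdrop]; exact List.length_dropWhile_le _ _
              simp only [List.length_cons] at h1
              omega
            rw [ih zs hlen (pos + 1 + k + 1) pos (fun h => absurd h (by omega))]
            congr 1
            ring
      · rw [ggpA2]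
        have h1 : ¬ (x = "." ∧ (0:Int) = 0) := by rintro ⟨h, _⟩; exact hx h
        rw [if_neg h1, if_neg hx]
        have h2 : ¬ (x ≠ "." ∧ (0:Int) > 0) := by rintro ⟨_, h⟩; omega
        rw [if_neg h2]
        rw [ggpB_loop_cons_nondot m x xs pos hx]
        exact ih xs hl (pos + 1) good hg

-- ===== VERDICT (by name: the statement is the Claim_ definition above) =====
theorem get_good_position_spec : Claim_equal_get_good_position := by
  intro l m j _
  unfold Spec_get_good_position get_good_position get_good_position_alt
  have hslice : PySem.List.slice l none (some (max j 0)) = l.take j.toNat := by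
    have hmax : max j 0 = ((j.toNat : Nat) : Int) := (Int.toNat_eq_max j).symm
    rw [hmax, PySem.List.slice_to_natCast]
  rw [hslice]
  rw [ggpA_loop_eq_ggpA2]
  have hsub : j - 0 = j := by ring
  rw [hsub]
  exact ggpA2_eq_ggpB m (l.take j.toNat).length (l.take j.toNat) le_rfl 0 (-1) (fun _ => rfl)
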